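-- pv_equiv track=rewrite | github.com/Peti352/Prediction | src/display/cli.py | _colorize_form
-- ===== SOURCE A (Python) =====
-- def _colorize_form(form: str) -> str:
--     """Forma string színezése."""
--     colored = ""
--     for c in form:
--         if c == "W":
--             colored += "[green]W[/green]"
--         elif c == "D":
--             colored += "[yellow]D[/yellow]"
--         elif c == "L":
--             colored += "[red]L[/red]"
--         else:
--             colored += c
--     return colored
-- ===== SOURCE B (Python) =====
-- def _colorize_form(form: str) -> str:
--     """Forma string színezése."""
--     return (form.replace("W", "[green]W[/green]")
--                 .replace("D", "[yellow]D[/yellow]")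
--                 .replace("L", "[red]L[/red]"))
-- ===== Notes on version B (the rewrite author's own statement) =====
-- stated objective: idiomatic
-- what changed: Replaced the per-character loop with string accumulator by three whole-string str.replace substitutions (W, then D, then L; no template reintroduces a later target), moving the scan into C-level library calls.
import Mathlib
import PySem

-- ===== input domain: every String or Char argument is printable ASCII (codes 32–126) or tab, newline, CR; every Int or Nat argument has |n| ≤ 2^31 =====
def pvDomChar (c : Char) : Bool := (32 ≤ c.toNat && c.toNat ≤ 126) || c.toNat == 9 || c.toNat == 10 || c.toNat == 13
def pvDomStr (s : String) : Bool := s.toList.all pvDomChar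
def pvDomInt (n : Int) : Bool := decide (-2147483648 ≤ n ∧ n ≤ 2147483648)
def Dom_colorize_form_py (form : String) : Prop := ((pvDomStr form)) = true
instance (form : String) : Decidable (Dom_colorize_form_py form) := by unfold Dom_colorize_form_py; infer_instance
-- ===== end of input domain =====

-- B replaces A's per-character loop with three whole-string replace substitutions (idiomatic).

-- ===== PORT A =====
-- the per-character expansion of A's if/elif/else chain
def colorizeCharA (c : Char) : List Char :=
  if c == 'W' then "[green]W[/green]".toList
  else if c == 'D' then "[yellow]D[/yellow]".toList
  else if c == 'L' then "[red]L[/red]".toList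
  else [c]

def colorize_form_py (form : String) : String :=
  String.ofList (form.toList.foldl (fun colored c => colored ++ colorizeCharA c) [])

-- ===== PORT B =====
def colorize_form_py_alt (form : String) : String :=
  PySem.Str.replace
    (PySem.Str.replace
      (PySem.Str.replace form "W" "[green]W[/green]")
      "D" "[yellow]D[/yellow]")
    "L" "[red]L[/red]"

-- ===== PRECONDITION & SPEC =====
def Spec_colorize_form_py (form : String) (out : String) : Prop := out = colorize_form_py_alt form
instance (form : String) (out : String) : Decidable (Spec_colorize_form_py form out) := by unfold Spec_colorize_form_py; infer_instance

-- ===== CLAIM (what is proved, stated in full; the proofs are below) =====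
def Claim_equal_colorize_form_py : Prop := ∀ (form : String), Dom_colorize_form_py form → Spec_colorize_form_py form (colorize_form_py form)

-- ===== LEMMAS AND PROOFS =====

-- replace.go with a single-character pattern is the element-wise substitution
theorem replace_go_single (x : Char) (new : List Char) :
    ∀ (fuel : Nat) (l acc : List Char), l.length ≤ fuel →
      PySem.Chars.replace.go [x] new fuel l acc
        = acc.reverse ++ l.flatMap (fun c => if c = x then new else [c]) := by
  intro fuel
  induction fuel with
  | zero =>
    intro l acc h
    have : l = [] := List.eq_nil_of_length_eq_zero (Nat.le_zero.mp h)
    subst this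
    simp [PySem.Chars.replace.go]
  | succ n ih =>
    intro l acc h
    cases l with
    | nil => simp [PySem.Chars.replace.go]
    | cons c t =>
      simp only [PySem.Chars.replace.go]
      by_cases hc : c = x
      · subst hc
        have hpre : List.isPrefixOf [c] (c :: t) = true := by
          simp [List.isPrefixOf]
        rw [if_pos hpre]
        have hdrop : List.drop (List.length [c]) (c :: t) = t := rfl
        have ht : t.length ≤ n := by simpa using h
        rw [hdrop, ih _ _ ht]
        simp
      · have hpre : List.isPrefixOf [x] (c :: t) = false := by
          simp [List.isPrefixOf]
          exact fun h' => absurd h'.symm hc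
        rw [if_neg (by simp [hpre])]
        have ht : t.length ≤ n := by simpa using h
        rw [ih _ _ ht]
        simp [hc]

-- replace with a single-character pattern is a flatMap
theorem replace_single (s : List Char) (x : Char) (new : List Char) :
    PySem.Chars.replace s [x] new = s.flatMap (fun c => if c = x then new else [c]) := by
  simp only [PySem.Chars.replace, List.isEmpty]
  rw [replace_go_single x new s.length s [] le_rfl]
  simp


-- ===== VERDICT (by name: the statement is the Claim_ definition above) =====
theorem colorize_form_py_spec : Claim_equal_colorize_form_py := by
  intro form _
  unfold Spec_colorize_form_py colorize_form_py colorize_form_py_alt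
  simp only [PySem.Str.replace, String.toList_ofList]
  rw [PySem.List.foldl_append_eq_flatMap]
  show String.ofList _ = String.ofList _
  congr 1
  rw [show "W".toList = ['W'] from rfl, show "D".toList = ['D'] from rfl,
      show "L".toList = ['L'] from rfl,
      replace_single, replace_single, replace_single]
  rw [List.flatMap_assoc, List.flatMap_assoc]
  simp only [List.nil_append]
  apply List.flatMap_congr
  intro c _
  by_cases hW : c = 'W'
  · subst hW; decide
  · by_cases hD : c = 'D'
    · subst hD; decide
    · by_cases hL : c = 'L'
      · subst hL; decide
      · simp [colorizeCharA, hW, hD, hL]
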